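-- pv_equiv track=rewrite | github.com/saschagottfried/blenderfds | branches/BlenderFDS_dev/blenderfds/bf_geometry.py | _grow_boxes_along_x
-- ===== SOURCE A (Python) =====
-- def _grow_boxes_along_x(boxes):
--     """Grow boxes along x axis"""
--     boxes_grown = set()
--     while boxes:
--         box = list(boxes.pop())
--         while True: # fatten into +x direction
--             box_desired = (box[1], box[1] + 1, box[2], box[3], box[4], box[5],)
--             if box_desired not in boxes: break
--             boxes.remove(box_desired)
--             box[1] += 1
--         while True: # fatten into -x direction
--             box_desired = (box[0] - 1, box[0], box[2], box[3], box[4], box[5],)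
--             if box_desired not in boxes: break
--             boxes.remove(box_desired)
--             box[0] -= 1
--         boxes_grown.add(tuple(box))
--     return boxes_grown
-- ===== SOURCE B (Python) =====
-- # B: instead of destructively popping boxes and fattening one unit step at a time by
-- # membership tests and removals, precompute (sort + one scan) the maximal runs of
-- # unit-width boxes per slab signature as intervals, then make one pass over the boxes
-- # consuming whole intervals (or interval parts) at once.
-- # A empties its argument (a set) in place; B never mutates it (the return values agree).
-- def _grow_boxes_along_x(boxes):
--     lst = list(boxes)
--     unit_sigs = [((y0, y1, z0, z1), x0) for x0, x1, y0, y1, z0, z1 in lst if x1 == x0 + 1]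
--     sigs = list(dict.fromkeys(s for s, _ in unit_sigs))
--     ivals = []
--     for sig in sigs:
--         xs = sorted(x for s, x in unit_sigs if s == sig)
--         runs = []
--         for x in xs:
--             if runs and runs[-1][2] == x:
--                 runs[-1] = (sig, runs[-1][1], x + 1)
--             else:
--                 runs.append((sig, x, x + 1))
--         ivals.extend(runs)
--     grown = set()
--     for x0, x1, y0, y1, z0, z1 in lst:
--         sig = (y0, y1, z0, z1)
--         if x1 == x0 + 1:
--             iv = next((r for r in ivals if r[0] == sig and r[1] <= x0 < r[2]), None)
--             if iv is None:
--                 continue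
--             ivals.remove(iv)
--             grown.add((iv[1], iv[2], y0, y1, z0, z1))
--         else:
--             hi = x1
--             iv = next((r for r in ivals if r[0] == sig and r[1] <= x1 < r[2]), None)
--             if iv is not None:
--                 hi = iv[2]
--                 ivals.remove(iv)
--                 if iv[1] < x1:
--                     ivals.append((sig, iv[1], x1))
--             lo = x0
--             iv = next((r for r in ivals if r[0] == sig and r[1] < x0 <= r[2]), None)
--             if iv is not None:
--                 lo = iv[1]
--                 ivals.remove(iv)
--                 if x0 < iv[2]:
--                     ivals.append((sig, x0, iv[2]))
--             grown.add((lo, hi, y0, y1, z0, z1))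
--     return grown
-- ===== Notes on version B (the rewrite author's own statement) =====
-- stated objective: alternative
-- what changed: Instead of destructively popping boxes from the set and fattening one unit step at a time via membership tests and removals, B precomputes (sort + one scan) the maximal runs of unit-width boxes per slab signature as intervals and then makes one non-mutating pass over the boxes consuming whole intervals or interval parts at once; Pre_ only restricts the list to be duplicate-free, the invariant of the list that models the Python set argument.
import Mathlib
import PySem

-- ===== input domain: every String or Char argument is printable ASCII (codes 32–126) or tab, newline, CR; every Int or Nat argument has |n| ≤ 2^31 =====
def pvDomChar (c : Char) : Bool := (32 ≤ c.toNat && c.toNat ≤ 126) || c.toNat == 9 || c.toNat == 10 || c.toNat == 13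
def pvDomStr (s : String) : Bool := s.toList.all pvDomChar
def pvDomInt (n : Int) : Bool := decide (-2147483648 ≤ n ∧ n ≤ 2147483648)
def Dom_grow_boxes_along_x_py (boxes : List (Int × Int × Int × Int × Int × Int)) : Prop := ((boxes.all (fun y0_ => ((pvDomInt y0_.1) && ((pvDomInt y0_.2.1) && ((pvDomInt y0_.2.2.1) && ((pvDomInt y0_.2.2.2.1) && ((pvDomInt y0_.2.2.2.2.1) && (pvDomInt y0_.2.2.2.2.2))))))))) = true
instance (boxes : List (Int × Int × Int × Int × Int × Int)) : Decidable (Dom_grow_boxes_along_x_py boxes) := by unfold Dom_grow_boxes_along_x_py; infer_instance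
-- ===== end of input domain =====

-- B replaces A's destructive greedy (pop a box, fatten it one unit step at a time by
-- membership tests and removals until its argument is empty — an in-place mutation B does
-- not have; the equivalence claimed here is about the RETURN value only) by a two-phase
-- algorithm: precompute (sort + one scan) the maximal runs of unit-width boxes per slab
-- signature as intervals, then one pass over the boxes consuming whole intervals at once.

abbrev PvBox := Int × Int × Int × Int × Int × Int
abbrev PvSig := Int × Int × Int × Int
abbrev PvIv := PvSig × Int × Int

-- ===== PORT A =====
-- inner 'while True' fattening into +x: membership test + list.remove fused into
-- PySem.List.remove? (none = 'box_desired not in boxes' = break); fuel ≥ length suffices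
-- since every iteration removes one element.
def pvAGrowR (fuel : Nat) (L : List PvBox) (x1 y0 y1 z0 z1 : Int) : List PvBox × Int :=
  match fuel with
  | 0 => (L, x1)
  | f + 1 =>
    match PySem.List.remove? L (x1, x1 + 1, y0, y1, z0, z1) with
    | none => (L, x1)
    | some L' => pvAGrowR f L' (x1 + 1) y0 y1 z0 z1

-- inner 'while True' fattening into -x
def pvAGrowL (fuel : Nat) (L : List PvBox) (x0 y0 y1 z0 z1 : Int) : List PvBox × Int :=
  match fuel with
  | 0 => (L, x0)
  | f + 1 =>
    match PySem.List.remove? L (x0 - 1, x0, y0, y1, z0, z1) with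
    | none => (L, x0)
    | some L' => pvAGrowL f L' (x0 - 1) y0 y1 z0 z1

-- outer 'while boxes': boxes.pop() on a Python SET pops in iteration order, i.e. the FIRST
-- element of the distinct-elements list (CPython: pop and remove keep the table order of the
-- remaining elements); fuel ≥ length suffices (each round pops one)
def pvALoop (fuel : Nat) (L : List PvBox) (grown : PySem.Set PvBox) : PySem.Set PvBox :=
  match fuel with
  | 0 => grown
  | f + 1 =>
    match PySem.List.pop? L 0 with
    | none => grown
    | some ((x0, x1, y0, y1, z0, z1), L') =>
      let r := pvAGrowR L'.length L' x1 y0 y1 z0 z1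
      let l := pvAGrowL r.1.length r.1 x0 y0 y1 z0 z1
      pvALoop f l.1 (PySem.Set.add grown (l.2, r.2, y0, y1, z0, z1))

def grow_boxes_along_x_py (boxes : List (Int × Int × Int × Int × Int × Int)) : List (Int × Int × Int × Int × Int × Int) :=
  pvALoop boxes.length boxes PySem.Set.empty

-- ===== PORT B =====
def pvSigOf (b : PvBox) : PvSig := (b.2.2.1, b.2.2.2.1, b.2.2.2.2.1, b.2.2.2.2.2)

-- the list comprehension over the unit-width boxes
def pvUnitSigs (lst : List PvBox) : List (PvSig × Int) :=
  (lst.filter (fun b => b.2.1 == b.1 + 1)).map (fun b => (pvSigOf b, b.1))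

-- one step of the 'for x in xs' scan: extend the last run or open a new one
def pvRunStep (sig : PvSig) (runs : List PvIv) (x : Int) : List PvIv :=
  match runs.getLast? with
  | some (_, a, b) => if b == x then runs.dropLast ++ [(sig, a, x + 1)] else runs ++ [(sig, x, x + 1)]
  | none => [(sig, x, x + 1)]

def pvRunsOf (sig : PvSig) (xs : List Int) : List PvIv := xs.foldl (pvRunStep sig) []

-- 'for sig in sigs: xs = sorted(…); …; ivals.extend(runs)'
def pvBuildIvals (us : List (PvSig × Int)) (sigs : List PvSig) : List PvIv :=
  sigs.foldl (fun acc sig =>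
    acc ++ pvRunsOf sig (PySem.List.sorted ((us.filter (fun p => p.1 == sig)).map Prod.snd) (fun x => x) false)) []

-- right stanza of the non-unit branch: 'ivals.remove(iv)' of an element found by the
-- generator is erase-first (exact); the kept lower part is re-appended.
def pvConsumeR (ivals : List PvIv) (sig : PvSig) (x1 : Int) : List PvIv × Int :=
  match ivals.find? (fun r => r.1 == sig && decide (r.2.1 ≤ x1) && decide (x1 < r.2.2)) with
  | none => (ivals, x1)
  | some iv => (ivals.erase iv ++ (if iv.2.1 < x1 then [(sig, iv.2.1, x1)] else []), iv.2.2)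

-- left stanza of the non-unit branch
def pvConsumeL (ivals : List PvIv) (sig : PvSig) (x0 : Int) : List PvIv × Int :=
  match ivals.find? (fun r => r.1 == sig && decide (r.2.1 < x0) && decide (x0 ≤ r.2.2)) with
  | none => (ivals, x0)
  | some iv => (ivals.erase iv ++ (if x0 < iv.2.2 then [(sig, x0, iv.2.2)] else []), iv.2.1)

-- one step of the 'for box in lst' loop; state = (ivals, grown)
def pvBStep (st : List PvIv × PySem.Set PvBox) (box : PvBox) : List PvIv × PySem.Set PvBox :=
  match box with
  | (x0, x1, y0, y1, z0, z1) =>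
    let sig : PvSig := (y0, y1, z0, z1)
    if x1 == x0 + 1 then
      match st.1.find? (fun r => r.1 == sig && decide (r.2.1 ≤ x0) && decide (x0 < r.2.2)) with
      | none => st
      | some iv => (st.1.erase iv, PySem.Set.add st.2 (iv.2.1, iv.2.2, y0, y1, z0, z1))
    else
      let p1 := pvConsumeR st.1 sig x1
      let p2 := pvConsumeL p1.1 sig x0
      (p2.1, PySem.Set.add st.2 (p2.2, p1.2, y0, y1, z0, z1))

def grow_boxes_along_x_py_alt (boxes : List (Int × Int × Int × Int × Int × Int)) : List (Int × Int × Int × Int × Int × Int) :=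
  let us := pvUnitSigs boxes
  let sigs := PySem.List.dedup (us.map Prod.fst)
  let ivals := pvBuildIvals us sigs
  (boxes.foldl pvBStep (ivals, PySem.Set.empty)).2

-- ===== PRECONDITION & SPEC =====
-- Pre_ restricts to duplicate-free lists: the argument is a Python SET, so the list that
-- models it (its distinct elements in iteration order) never carries duplicates.
def Pre_grow_boxes_along_x_py (boxes : List (Int × Int × Int × Int × Int × Int)) : Prop := boxes.Nodup
instance (boxes : List (Int × Int × Int × Int × Int × Int)) : Decidable (Pre_grow_boxes_along_x_py boxes) := by unfold Pre_grow_boxes_along_x_py; infer_instance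

def pvWitness_grow_boxes_along_x_py : (List (Int × Int × Int × Int × Int × Int)) := [(0, 1, 0, 1, 0, 1), (1, 2, 0, 1, 0, 1), (3, 6, 0, 1, 0, 1)]

def Spec_grow_boxes_along_x_py (boxes : List (Int × Int × Int × Int × Int × Int)) (out : List (Int × Int × Int × Int × Int × Int)) : Prop := out = grow_boxes_along_x_py_alt boxes
instance (boxes : List (Int × Int × Int × Int × Int × Int)) (out : List (Int × Int × Int × Int × Int × Int)) : Decidable (Spec_grow_boxes_along_x_py boxes out) := by unfold Spec_grow_boxes_along_x_py; infer_instance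

-- ===== CLAIM (what is proved, stated in full; the proofs are below) =====
def Claim_equal_grow_boxes_along_x_py : Prop := ∀ (boxes : List (Int × Int × Int × Int × Int × Int)), Dom_grow_boxes_along_x_py boxes → Pre_grow_boxes_along_x_py boxes → Spec_grow_boxes_along_x_py boxes (grow_boxes_along_x_py boxes)

-- ===== LEMMAS AND PROOFS =====

-- the unit box of slab sig starting at t
def pvMk (sig : PvSig) (t : Int) : PvBox := (t, t + 1, sig.1, sig.2.1, sig.2.2.1, sig.2.2.2)

def pvPredAt (sig : PvSig) (t : Int) : PvIv → Bool :=
  fun r => r.1 == sig && decide (r.2.1 ≤ t) && decide (t < r.2.2)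

-- 'some interval of ivals covers start t of slab sig'
def pvCov (ivals : List PvIv) (sig : PvSig) (t : Int) : Bool := ivals.any (pvPredAt sig t)

-- the box b is still present in A's working list (unit boxes only while covered)
def pvAvail (ivals : List PvIv) (b : PvBox) : Bool :=
  if b.2.1 == b.1 + 1 then pvCov ivals (pvSigOf b) b.1 else true

-- 'is a unit box of slab sig with start in [lo, hi)' — what a fattening phase removes
def pvSeg (sig : PvSig) (lo hi : Int) (u : PvBox) : Bool :=
  u.2.1 == u.1 + 1 && pvSigOf u == sig && decide (lo ≤ u.1) && decide (u.1 < hi)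

-- well-formed interval lists: nonempty intervals, same-slab intervals strictly separated
def pvWF (ivals : List PvIv) : Prop :=
  (∀ r ∈ ivals, r.2.1 < r.2.2) ∧
  ivals.Pairwise (fun r r' => r.1 = r'.1 → (r.2.2 < r'.2.1 ∨ r'.2.2 < r.2.1))

-- ---- generic facts ----

lemma pv_aLoop_nil (fuel : Nat) (grown : PySem.Set PvBox) : pvALoop fuel [] grown = grown := by
  cases fuel <;> simp [pvALoop, PySem.List.pop?]

lemma pv_predAt_iff (sig : PvSig) (t : Int) (r : PvIv) :
    pvPredAt sig t r = true ↔ r.1 = sig ∧ r.2.1 ≤ t ∧ t < r.2.2 := by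
  simp [pvPredAt, and_assoc]

lemma pv_WF_nodup {ivals : List PvIv} (h : pvWF ivals) : ivals.Nodup := by
  refine List.Pairwise.imp_of_mem ?_ h.2
  intro r r' hr hr' hrel heq
  subst heq
  rcases hrel rfl with h1 | h1 <;> exact absurd (h.1 r hr) (by omega)

lemma pv_sep {ivals : List PvIv} (h : pvWF ivals) {r r' : PvIv}
    (hr : r ∈ ivals) (hr' : r' ∈ ivals) (hne : r ≠ r') (hsig : r.1 = r'.1) :
    r.2.2 < r'.2.1 ∨ r'.2.2 < r.2.1 := by
  have hsym : Symmetric (fun (r r' : PvIv) => r.1 = r'.1 → (r.2.2 < r'.2.1 ∨ r'.2.2 < r.2.1)) := by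
    intro a b hab hba
    rcases hab hba.symm with h1 | h1
    · exact Or.inr h1
    · exact Or.inl h1
  exact h.2.forall hsym hr hr' hne hsig

lemma pv_cov_unique {ivals : List PvIv} (h : pvWF ivals) {r r' : PvIv} {sig : PvSig} {t : Int}
    (hr : r ∈ ivals) (hr' : r' ∈ ivals)
    (hp : pvPredAt sig t r = true) (hp' : pvPredAt sig t r' = true) : r = r' := by
  by_contra hne
  rw [pv_predAt_iff] at hp hp'
  rcases pv_sep h hr hr' hne (hp.1.trans hp'.1.symm) with h1 | h1 <;> omega

lemma pv_cov_iff (ivals : List PvIv) (sig : PvSig) (t : Int) :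
    pvCov ivals sig t = true ↔ ∃ r ∈ ivals, r.1 = sig ∧ r.2.1 ≤ t ∧ t < r.2.2 := by
  simp [pvCov, List.any_eq_true, pv_predAt_iff]

lemma pv_find?_none_iff (ivals : List PvIv) (sig : PvSig) (t : Int) :
    ivals.find? (pvPredAt sig t) = none ↔ pvCov ivals sig t = false := by
  rw [List.find?_eq_none]
  constructor
  · intro h
    cases hc : pvCov ivals sig t
    · rfl
    · obtain ⟨r, hr, hp⟩ := (pv_cov_iff _ _ _).1 hc
      exact absurd ((pv_predAt_iff _ _ _).2 hp) (by simpa using h r hr)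
  · intro h r hr hp
    have : pvCov ivals sig t = true := (pv_cov_iff _ _ _).2 ⟨r, hr, (pv_predAt_iff _ _ _).1 hp⟩
    simp [this] at h

lemma pv_cov_append (l l' : List PvIv) (sig : PvSig) (t : Int) :
    pvCov (l ++ l') sig t = (pvCov l sig t || pvCov l' sig t) := by
  simp [pvCov]

lemma pv_cov_of_mem {ivals : List PvIv} {r : PvIv} {sig : PvSig} {t : Int}
    (hr : r ∈ ivals) (h1 : r.1 = sig) (h2 : r.2.1 ≤ t) (h3 : t < r.2.2) :
    pvCov ivals sig t = true := (pv_cov_iff _ _ _).2 ⟨r, hr, h1, h2, h3⟩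

lemma pv_cov_erase {ivals : List PvIv} (hWF : pvWF ivals) {iv : PvIv} (hmem : iv ∈ ivals)
    (sig : PvSig) (t : Int) :
    pvCov (ivals.erase iv) sig t = (pvCov ivals sig t && !(pvPredAt sig t iv)) := by
  rw [Bool.eq_iff_iff]
  rw [pv_cov_iff]
  constructor
  · rintro ⟨r, hr, hp⟩
    have hr' : r ∈ ivals := List.mem_of_mem_erase hr
    have hrne : r ≠ iv := ((pv_WF_nodup hWF).mem_erase_iff.1 hr).1
    have hcov : pvCov ivals sig t = true := pv_cov_of_mem hr' hp.1 hp.2.1 hp.2.2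
    have hiv : pvPredAt sig t iv = false := by
      cases hp' : pvPredAt sig t iv
      · rfl
      · exact absurd (pv_cov_unique hWF hr' hmem ((pv_predAt_iff _ _ _).2 hp) hp') hrne
    simp [hcov, hiv]
  · intro h
    have hcov : pvCov ivals sig t = true := by
      cases hc : pvCov ivals sig t
      · simp [hc] at h
      · rfl
    have hiv : pvPredAt sig t iv = false := by
      cases hp' : pvPredAt sig t iv
      · rfl
      · simp [hcov, hp'] at h
    obtain ⟨r, hr, hp⟩ := (pv_cov_iff _ _ _).1 hcov
    refine ⟨r, ?_, hp⟩
    refine (pv_WF_nodup hWF).mem_erase_iff.2 ⟨?_, hr⟩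
    intro he
    rw [he] at hp
    rw [(pv_predAt_iff _ _ _).2 hp] at hiv
    exact absurd hiv (by simp)


lemma pv_WF_erase {ivals : List PvIv} (hWF : pvWF ivals) (iv : PvIv) :
    pvWF (ivals.erase iv) := by
  constructor
  · intro r hr
    exact hWF.1 r (List.mem_of_mem_erase hr)
  · exact hWF.2.sublist (List.erase_sublist ..)

lemma pv_WF_replace {ivals : List PvIv} (hWF : pvWF ivals) {iv : PvIv} (hmem : iv ∈ ivals)
    (ka kb : Int) (ha : iv.2.1 ≤ ka) (hb : kb ≤ iv.2.2) :
    pvWF (ivals.erase iv ++ (if ka < kb then [(iv.1, ka, kb)] else [])) := by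
  by_cases hk : ka < kb
  · simp only [if_pos hk]
    constructor
    · intro r hr
      rcases List.mem_append.1 hr with hr | hr
      · exact hWF.1 r (List.mem_of_mem_erase hr)
      · simp at hr
        subst hr
        simpa using hk
    · rw [List.pairwise_append]
      refine ⟨(pv_WF_erase hWF iv).2, List.pairwise_singleton _ _, ?_⟩
      intro r hr r' hr'
      simp at hr'
      subst hr'
      intro hsig
      have hrmem : r ∈ ivals := List.mem_of_mem_erase hr
      have hrne : r ≠ iv := ((pv_WF_nodup hWF).mem_erase_iff.1 hr).1
      rcases pv_sep hWF hrmem hmem hrne (by simpa using hsig) with h1 | h1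
      · left
        simp only
        omega
      · right
        simp only
        omega
  · simp only [if_neg hk, List.append_nil]
    exact pv_WF_erase hWF iv

lemma pv_cov_replace {ivals : List PvIv} (hWF : pvWF ivals) {iv : PvIv} (hmem : iv ∈ ivals)
    (ka kb : Int) (ha : iv.2.1 ≤ ka) (hb : kb ≤ iv.2.2) (sig : PvSig) (t : Int) :
    pvCov (ivals.erase iv ++ (if ka < kb then [(iv.1, ka, kb)] else [])) sig t
      = (pvCov ivals sig t && !(pvPredAt sig t iv && !(decide (ka ≤ t) && decide (t < kb)))) := by
  rw [pv_cov_append, pv_cov_erase hWF hmem]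
  have hfrag : pvCov (if ka < kb then [(iv.1, ka, kb)] else []) sig t
      = (decide (ka < kb) && (iv.1 == sig) && decide (ka ≤ t) && decide (t < kb)) := by
    by_cases hk : ka < kb
    · simp [hk, pvCov, pvPredAt, Bool.and_assoc]
    · simp [hk, pvCov]
  rw [hfrag]
  by_cases hp : pvPredAt sig t iv = true
  · obtain ⟨hs, hA, hB⟩ := (pv_predAt_iff sig t iv).1 hp
    have hc : pvCov ivals sig t = true := pv_cov_of_mem hmem hs hA hB
    have hk : decide (ka < kb) = true ∨ (decide (ka ≤ t) && decide (t < kb)) = false := by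
      by_cases h1 : ka < kb
      · exact Or.inl (by simpa using h1)
      · right
        rw [Bool.and_eq_false_iff]
        by_cases h2 : ka ≤ t
        · right; simpa using by omega
        · left; simpa using h2
    rcases hk with hk | hk
    · rw [hp, hc, hk, hs]
      cases h1 : decide (ka ≤ t) <;> cases h2 : decide (t < kb) <;> simp
    · rw [hp, hc, hk]
      rcases Bool.and_eq_false_iff.1 hk with h1 | h1 <;> simp [h1]
  · have hp' : pvPredAt sig t iv = false := by simpa using hp
    have hF : ((iv.1 == sig) && decide (ka ≤ t) && decide (t < kb)) = false := by
      cases hF' : ((iv.1 == sig) && decide (ka ≤ t) && decide (t < kb))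
      · rfl
      · simp only [Bool.and_eq_true, beq_iff_eq, decide_eq_true_eq] at hF'
        have : pvPredAt sig t iv = true :=
          (pv_predAt_iff sig t iv).2 ⟨hF'.1.1, by omega, by omega⟩
        rw [this] at hp'
        exact hp'
    rw [hp']
    rw [show (decide (ka < kb) && (iv.1 == sig) && decide (ka ≤ t) && decide (t < kb))
        = (decide (ka < kb) && ((iv.1 == sig) && decide (ka ≤ t) && decide (t < kb))) by
      simp [Bool.and_assoc]]
    rw [hF]
    simp
lemma pv_cov_end {ivals : List PvIv} (hWF : pvWF ivals) {iv : PvIv} (hmem : iv ∈ ivals)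
    {sig : PvSig} (hsig : iv.1 = sig) : pvCov ivals sig iv.2.2 = false := by
  cases h : pvCov ivals sig iv.2.2
  · rfl
  · exfalso
    obtain ⟨r, hr, h1, h2, h3⟩ := (pv_cov_iff _ _ _).1 h
    have hne : r ≠ iv := by
      intro he
      subst he
      omega
    have hne' := hWF.1 iv hmem
    rcases pv_sep hWF hr hmem hne (h1.trans hsig.symm) with hs | hs <;> omega

lemma pv_cov_start {ivals : List PvIv} (hWF : pvWF ivals) {iv : PvIv} (hmem : iv ∈ ivals)
    {sig : PvSig} (hsig : iv.1 = sig) : pvCov ivals sig (iv.2.1 - 1) = false := by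
  cases h : pvCov ivals sig (iv.2.1 - 1)
  · rfl
  · exfalso
    obtain ⟨r, hr, h1, h2, h3⟩ := (pv_cov_iff _ _ _).1 h
    have hne : r ≠ iv := by
      intro he
      subst he
      omega
    have hne' := hWF.1 iv hmem
    rcases pv_sep hWF hr hmem hne (h1.trans hsig.symm) with hs | hs <;> omega

lemma pv_consumeR_spec (ivals : List PvIv) (sig : PvSig) (x1 : Int) (hWF : pvWF ivals) :
    pvWF (pvConsumeR ivals sig x1).1
  ∧ x1 ≤ (pvConsumeR ivals sig x1).2
  ∧ (∀ t, x1 ≤ t → t < (pvConsumeR ivals sig x1).2 → pvCov ivals sig t = true)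
  ∧ pvCov ivals sig (pvConsumeR ivals sig x1).2 = false
  ∧ (∀ sig' t, pvCov (pvConsumeR ivals sig x1).1 sig' t
       = (pvCov ivals sig' t && !((sig' == sig) && decide (x1 ≤ t) && decide (t < (pvConsumeR ivals sig x1).2)))) := by
  have hpred : (fun r : PvIv => r.1 == sig && decide (r.2.1 ≤ x1) && decide (x1 < r.2.2)) = pvPredAt sig x1 := rfl
  cases hfind : ivals.find? (pvPredAt sig x1) with
  | none =>
    have hres : pvConsumeR ivals sig x1 = (ivals, x1) := by
      unfold pvConsumeR
      rw [hpred, hfind]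
    rw [hres]
    have hcov : pvCov ivals sig x1 = false := (pv_find?_none_iff _ _ _).1 hfind
    refine ⟨hWF, le_refl _, by omega, hcov, ?_⟩
    intro sig' t
    have : ((sig' == sig) && decide (x1 ≤ t) && decide (t < x1)) = false := by
      by_cases h1 : x1 ≤ t <;> by_cases h2 : t < x1 <;> simp [h1, h2] <;> omega
    simp [this]
  | some iv =>
    have hmem : iv ∈ ivals := List.mem_of_find?_eq_some hfind
    obtain ⟨h1, h2, h3⟩ := (pv_predAt_iff _ _ _).1 (List.find?_some hfind)
    have hres : pvConsumeR ivals sig x1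
        = (ivals.erase iv ++ (if iv.2.1 < x1 then [(iv.1, iv.2.1, x1)] else []), iv.2.2) := by
      unfold pvConsumeR
      rw [hpred, hfind, h1]
    rw [hres]
    refine ⟨pv_WF_replace hWF hmem iv.2.1 x1 (le_refl _) (le_of_lt h3),
      le_of_lt h3, ?_, pv_cov_end hWF hmem h1, ?_⟩
    · intro t ht1 ht2
      exact pv_cov_of_mem hmem h1 (by omega) (by omega)
    · intro sig' t
      rw [pv_cov_replace hWF hmem iv.2.1 x1 (le_refl _) (le_of_lt h3)]
      congr 1
      congr 1
      by_cases hs : sig' = sig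
      · subst hs
        by_cases hA : iv.2.1 ≤ t <;> by_cases hB : t < iv.2.2 <;>
          by_cases hK1 : x1 ≤ t <;> by_cases hK2 : t < x1 <;>
            simp [pvPredAt, h1, hA, hB, hK1, hK2] <;> omega
      · have e1 : (iv.1 == sig') = false := by
          simp [h1]
          exact fun he => hs he.symm
        have e2 : (sig' == sig) = false := by simpa using hs
        simp [pvPredAt, e1, e2]

lemma pv_consumeL_spec (ivals : List PvIv) (sig : PvSig) (x0 : Int) (hWF : pvWF ivals) :
    pvWF (pvConsumeL ivals sig x0).1
  ∧ (pvConsumeL ivals sig x0).2 ≤ x0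
  ∧ (∀ t, (pvConsumeL ivals sig x0).2 ≤ t → t < x0 → pvCov ivals sig t = true)
  ∧ pvCov ivals sig ((pvConsumeL ivals sig x0).2 - 1) = false
  ∧ (∀ sig' t, pvCov (pvConsumeL ivals sig x0).1 sig' t
       = (pvCov ivals sig' t && !((sig' == sig) && decide ((pvConsumeL ivals sig x0).2 ≤ t) && decide (t < x0)))) := by
  have hpred : (fun r : PvIv => r.1 == sig && decide (r.2.1 < x0) && decide (x0 ≤ r.2.2)) = pvPredAt sig (x0 - 1) := by
    funext r
    unfold pvPredAt
    rw [show decide (r.2.1 < x0) = decide (r.2.1 ≤ x0 - 1) from decide_eq_decide.2 (by omega),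
        show decide (x0 ≤ r.2.2) = decide (x0 - 1 < r.2.2) from decide_eq_decide.2 (by omega)]
  cases hfind : ivals.find? (pvPredAt sig (x0 - 1)) with
  | none =>
    have hres : pvConsumeL ivals sig x0 = (ivals, x0) := by
      unfold pvConsumeL
      rw [hpred, hfind]
    rw [hres]
    have hcov : pvCov ivals sig (x0 - 1) = false := (pv_find?_none_iff _ _ _).1 hfind
    refine ⟨hWF, le_refl _, by omega, by simpa using hcov, ?_⟩
    intro sig' t
    have : ((sig' == sig) && decide (x0 ≤ t) && decide (t < x0)) = false := by
      by_cases h1 : x0 ≤ t <;> by_cases h2 : t < x0 <;> simp [h1, h2] <;> omega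
    simp [this]
  | some iv =>
    have hmem : iv ∈ ivals := List.mem_of_find?_eq_some hfind
    obtain ⟨h1, h2, h3⟩ := (pv_predAt_iff _ _ _).1 (List.find?_some hfind)
    have hres : pvConsumeL ivals sig x0
        = (ivals.erase iv ++ (if x0 < iv.2.2 then [(iv.1, x0, iv.2.2)] else []), iv.2.1) := by
      unfold pvConsumeL
      rw [hpred, hfind, h1]
    rw [hres]
    refine ⟨pv_WF_replace hWF hmem x0 iv.2.2 (by omega) (le_refl _),
      by omega, ?_, pv_cov_start hWF hmem h1, ?_⟩
    · intro t ht1 ht2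
      exact pv_cov_of_mem hmem h1 (by omega) (by omega)
    · intro sig' t
      rw [pv_cov_replace hWF hmem x0 iv.2.2 (by omega) (le_refl _)]
      congr 1
      congr 1
      by_cases hs : sig' = sig
      · subst hs
        by_cases hA : iv.2.1 ≤ t <;> by_cases hB : t < iv.2.2 <;>
          by_cases hK2 : t < x0 <;> by_cases hK3 : x0 ≤ t <;>
            simp [pvPredAt, h1, hA, hB, hK2, hK3] <;> omega
      · have e1 : (iv.1 == sig') = false := by
          simp [h1]
          exact fun he => hs he.symm
        have e2 : (sig' == sig) = false := by simpa using hs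
        simp [pvPredAt, e1, e2]
lemma pv_growR_none {L : List PvBox} {c y0 y1 z0 z1 : Int} (h : (c, c + 1, y0, y1, z0, z1) ∉ L)
    (fuel : Nat) : pvAGrowR fuel L c y0 y1 z0 z1 = (L, c) := by
  cases fuel <;> simp [pvAGrowR, (PySem.List.remove?_eq_none_iff _ _).2 h]

lemma pv_growL_none {L : List PvBox} {c y0 y1 z0 z1 : Int} (h : (c - 1, c, y0, y1, z0, z1) ∉ L)
    (fuel : Nat) : pvAGrowL fuel L c y0 y1 z0 z1 = (L, c) := by
  cases fuel <;> simp [pvAGrowL, (PySem.List.remove?_eq_none_iff _ _).2 h]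

lemma pv_seg_or (y0 y1 z0 z1 c d : Int) (hcd : c < d) (u : PvBox) :
    pvSeg (y0, y1, z0, z1) c d u
      = ((u == (c, c + 1, y0, y1, z0, z1)) || pvSeg (y0, y1, z0, z1) (c + 1) d u) := by
  obtain ⟨u1, u2, u3, u4, u5, u6⟩ := u
  rw [Bool.eq_iff_iff]
  simp [pvSeg, pvSigOf, Prod.ext_iff]
  omega

lemma pv_seg_empty (y0 y1 z0 z1 c : Int) (L : List PvBox) :
    L.filter (fun u => !pvSeg (y0, y1, z0, z1) c c u) = L := by
  apply List.filter_eq_self.2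
  intro u hu
  simp only [Bool.not_eq_eq_eq_not, Bool.not_true, pvSeg]
  by_cases h3 : c ≤ u.1
  · have h4 : decide (u.1 < c) = false := by simpa using by omega
    simp [h4]
  · have h4 : decide (c ≤ u.1) = false := by simpa using h3
    simp [h4]

lemma pv_growR_chunk : ∀ (k : Nat) (L : List PvBox) (c : Int) (fuel : Nat) (y0 y1 z0 z1 : Int),
    L.Nodup → L.length ≤ fuel →
    (∀ t : Int, c ≤ t → t < c + k → (t, t + 1, y0, y1, z0, z1) ∈ L) →
    ((c + k, c + k + 1, y0, y1, z0, z1) ∉ L) →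
    pvAGrowR fuel L c y0 y1 z0 z1
      = (L.filter (fun u => !pvSeg (y0, y1, z0, z1) c (c + k) u), c + k) := by
  intro k
  induction k with
  | zero =>
    intro L c fuel y0 y1 z0 z1 hnd hfuel hcov hstop
    rw [show c + ((0 : Nat) : Int) = c by push_cast; ring] at hstop ⊢
    rw [pv_seg_empty]
    exact pv_growR_none hstop fuel
  | succ k ih =>
    intro L c fuel y0 y1 z0 z1 hnd hfuel hcov hstop
    rw [show ((k + 1 : Nat) : Int) = (k : Int) + 1 from by push_cast; ring] at hcov hstop ⊢
    have hc : (c, c + 1, y0, y1, z0, z1) ∈ L := hcov c (le_refl _) (by omega)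
    cases fuel with
    | zero => exact absurd (List.length_pos_of_mem hc) (by omega)
    | succ f =>
      simp only [pvAGrowR, PySem.List.remove?_eq_some_erase _ _ hc]
      have hnd' : (L.erase (c, c + 1, y0, y1, z0, z1)).Nodup := hnd.erase _
      have hlen' : (L.erase (c, c + 1, y0, y1, z0, z1)).length ≤ f := by
        rw [List.length_erase_of_mem hc]
        have := List.length_pos_of_mem hc
        omega
      have hcov' : ∀ t : Int, c + 1 ≤ t → t < (c + 1) + k →
          (t, t + 1, y0, y1, z0, z1) ∈ L.erase (c, c + 1, y0, y1, z0, z1) := by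
        intro t ht1 ht2
        refine hnd.mem_erase_iff.2 ⟨?_, hcov t (by omega) (by push_cast; push_cast at ht2; omega)⟩
        intro he
        have : t = c := congrArg (·.1) he
        omega
      have hstop' : ((c + 1) + k, (c + 1) + k + 1, y0, y1, z0, z1)
          ∉ L.erase (c, c + 1, y0, y1, z0, z1) := by
        intro hmem
        refine hstop ?_
        have := List.mem_of_mem_erase hmem
        rw [show c + ((k : Int) + 1) = (c + 1) + k by ring]
        exact this
      rw [ih _ (c + 1) f y0 y1 z0 z1 hnd' hlen' hcov' hstop']
      rw [hnd.erase_eq_filter _, List.filter_filter]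
      refine Prod.ext ?_ (by simp only; ring)
      simp only
      apply List.filter_congr
      intro u hu
      rw [pv_seg_or y0 y1 z0 z1 c (c + ((k : Int) + 1)) (by omega) u]
      rw [show c + ((k : Int) + 1) = (c + 1) + k by ring]
      cases h1 : (u == (c, c + 1, y0, y1, z0, z1)) <;>
        cases h2 : pvSeg (y0, y1, z0, z1) (c + 1) ((c + 1) + k) u <;>
          simp [h1, bne]
lemma pv_segL_or (y0 y1 z0 z1 c d : Int) (hcd : d < c) (u : PvBox) :
    pvSeg (y0, y1, z0, z1) d c u
      = ((u == (c - 1, c, y0, y1, z0, z1)) || pvSeg (y0, y1, z0, z1) d (c - 1) u) := by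
  obtain ⟨u1, u2, u3, u4, u5, u6⟩ := u
  rw [Bool.eq_iff_iff]
  simp [pvSeg, pvSigOf, Prod.ext_iff]
  omega

lemma pv_growL_chunk : ∀ (k : Nat) (L : List PvBox) (c : Int) (fuel : Nat) (y0 y1 z0 z1 : Int),
    L.Nodup → L.length ≤ fuel →
    (∀ t : Int, c - k ≤ t → t < c → (t, t + 1, y0, y1, z0, z1) ∈ L) →
    ((c - k - 1, c - k, y0, y1, z0, z1) ∉ L) →
    pvAGrowL fuel L c y0 y1 z0 z1
      = (L.filter (fun u => !pvSeg (y0, y1, z0, z1) (c - k) c u), c - k) := by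
  intro k
  induction k with
  | zero =>
    intro L c fuel y0 y1 z0 z1 hnd hfuel hcov hstop
    rw [show c - ((0 : Nat) : Int) = c by push_cast; ring] at hstop ⊢
    rw [pv_seg_empty]
    exact pv_growL_none (by simpa using hstop) fuel
  | succ k ih =>
    intro L c fuel y0 y1 z0 z1 hnd hfuel hcov hstop
    rw [show ((k + 1 : Nat) : Int) = (k : Int) + 1 from by push_cast; ring] at hcov hstop ⊢
    have hc : (c - 1, c, y0, y1, z0, z1) ∈ L := by
      have := hcov (c - 1) (by omega) (by omega)
      simpa [show c - 1 + 1 = c by ring] using this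
    cases fuel with
    | zero => exact absurd (List.length_pos_of_mem hc) (by omega)
    | succ f =>
      simp only [pvAGrowL, PySem.List.remove?_eq_some_erase _ _ hc]
      have hnd' : (L.erase (c - 1, c, y0, y1, z0, z1)).Nodup := hnd.erase _
      have hlen' : (L.erase (c - 1, c, y0, y1, z0, z1)).length ≤ f := by
        rw [List.length_erase_of_mem hc]
        have := List.length_pos_of_mem hc
        omega
      have hcov' : ∀ t : Int, (c - 1) - k ≤ t → t < c - 1 →
          (t, t + 1, y0, y1, z0, z1) ∈ L.erase (c - 1, c, y0, y1, z0, z1) := by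
        intro t ht1 ht2
        refine hnd.mem_erase_iff.2 ⟨?_, hcov t (by omega) (by omega)⟩
        intro he
        have : t = c - 1 := congrArg (·.1) he
        omega
      have hstop' : ((c - 1) - k - 1, (c - 1) - k, y0, y1, z0, z1)
          ∉ L.erase (c - 1, c, y0, y1, z0, z1) := by
        intro hmem
        refine hstop ?_
        have := List.mem_of_mem_erase hmem
        rw [show c - ((k : Int) + 1) - 1 = (c - 1) - k - 1 by ring,
            show c - ((k : Int) + 1) = (c - 1) - k by ring]
        exact this
      rw [ih _ (c - 1) f y0 y1 z0 z1 hnd' hlen' hcov' hstop']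
      rw [hnd.erase_eq_filter _, List.filter_filter]
      refine Prod.ext ?_ (by simp only; ring)
      simp only
      apply List.filter_congr
      intro u hu
      rw [pv_segL_or y0 y1 z0 z1 c (c - ((k : Int) + 1)) (by omega) u]
      rw [show c - ((k : Int) + 1) = (c - 1) - k by ring]
      cases h1 : (u == (c - 1, c, y0, y1, z0, z1)) <;>
        cases h2 : pvSeg (y0, y1, z0, z1) ((c - 1) - k) (c - 1) u <;>
          simp [h1, bne]
-- ---- phase 1: the sorted-scan builds separated maximal runs ----

def pvChainAcc (sig : PvSig) (R : List PvIv) : Prop :=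
  (∀ r ∈ R, r.1 = sig ∧ r.2.1 < r.2.2) ∧ R.Pairwise (fun r r' => r.2.2 < r'.2.1)

lemma pv_chain_WF {sig : PvSig} {R : List PvIv} (h : pvChainAcc sig R) : pvWF R :=
  ⟨fun r hr => (h.1 r hr).2, h.2.imp (fun hlt _ => Or.inl hlt)⟩

lemma pv_runs_fold : ∀ (xs : List Int) (R : List PvIv) (sig : PvSig),
    xs.Pairwise (fun a b => a < b) → pvChainAcc sig R →
    (∀ r ∈ R, ∀ x ∈ xs, r.2.2 ≤ x) →
    pvChainAcc sig (xs.foldl (pvRunStep sig) R) ∧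
    (∀ t, pvCov (xs.foldl (pvRunStep sig) R) sig t = true ↔ (pvCov R sig t = true ∨ t ∈ xs)) := by
  intro xs
  induction xs with
  | nil =>
    intro R sig _ hacc _
    exact ⟨hacc, by simp⟩
  | cons x xs' ih =>
    intro R sig hpw hacc hfront
    have hpw' : xs'.Pairwise (fun a b => a < b) := hpw.of_cons
    have hxlt : ∀ x' ∈ xs', x < x' := by
      intro x' hx'
      exact List.rel_of_pairwise_cons hpw hx'
    rw [List.foldl_cons]
    -- facts about one step
    have hstep : ∃ R', R' = pvRunStep sig R x ∧ pvChainAcc sig R' ∧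
        (∀ r ∈ R', ∀ x' ∈ xs', r.2.2 ≤ x') ∧
        (∀ t, pvCov R' sig t = true ↔ (pvCov R sig t = true ∨ t = x)) := by
      refine ⟨pvRunStep sig R x, rfl, ?_⟩
      cases hlast : R.getLast? with
      | none =>
        have hR : R = [] := List.getLast?_eq_none_iff.1 hlast
        subst hR
        simp only [pvRunStep, List.getLast?_nil]
        refine ⟨⟨?_, ?_⟩, ?_, ?_⟩
        · intro r hr
          simp at hr
          subst hr
          exact ⟨rfl, by exact (by omega : x < x + 1)⟩
        · simp
        · intro r hr x' hx'
          simp at hr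
          subst hr
          have := hxlt x' hx'
          exact (by omega : x + 1 ≤ x')
        · intro t
          simp [pvCov, pvPredAt]
          omega
      | some last =>
        obtain ⟨s, a, b⟩ := last
        have hne : R ≠ [] := by
          intro h
          rw [h] at hlast
          simp at hlast
        have hdecomp : R.dropLast ++ [(s, a, b)] = R := by
          have h1 := List.dropLast_append_getLast hne
          rwa [List.getLast_eq_iff_getLast?_eq_some hne |>.2 hlast] at h1
        have hlmem : (s, a, b) ∈ R := by
          rw [← hdecomp]
          simp
        obtain ⟨hs, hab⟩ := hacc.1 _ hlmem
        simp only at hs hab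
        have hchain := hacc.2
        rw [← hdecomp, List.pairwise_append] at hchain
        obtain ⟨hchainD, -, hcross⟩ := hchain
        simp only [pvRunStep, hlast]
        by_cases hbx : b = x
        · have hbeq : (b == x) = true := by simpa using hbx
          simp only [hbeq, if_true]
          refine ⟨⟨?_, ?_⟩, ?_, ?_⟩
          · intro r hr
            rcases List.mem_append.1 hr with hr | hr
            · exact hacc.1 r (by rw [← hdecomp]; exact List.mem_append_left _ hr)
            · simp at hr
              subst hr
              exact ⟨rfl, by exact (by omega : a < x + 1)⟩
          · rw [List.pairwise_append]
            refine ⟨hchainD, by simp, ?_⟩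
            intro r hr r' hr'
            simp at hr'
            subst hr'
            have := hcross r hr (s, a, b) (by simp)
            simpa using this
          · intro r hr x' hx'
            rcases List.mem_append.1 hr with hr | hr
            · have : r ∈ R := by rw [← hdecomp]; exact List.mem_append_left _ hr
              exact hfront r this x' (List.mem_cons_of_mem _ hx')
            · simp at hr
              subst hr
              have := hxlt x' hx'
              exact (by omega : x + 1 ≤ x')
          · intro t
            conv_rhs => rw [← hdecomp]
            rw [pv_cov_append, pv_cov_append]
            simp only [Bool.or_eq_true]
            have h1 : pvCov [(sig, a, x + 1)] sig t = true ↔ a ≤ t ∧ t < x + 1 := by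
              simp [pvCov, pvPredAt]
            have h2 : pvCov [(s, a, b)] sig t = true ↔ a ≤ t ∧ t < b := by
              simp [pvCov, pvPredAt, hs]
            rw [h1, h2]
            constructor
            · rintro (h | h)
              · exact Or.inl (Or.inl h)
              · by_cases ht : t < b
                · exact Or.inl (Or.inr ⟨h.1, ht⟩)
                · right; omega
            · rintro ((h | h) | h)
              · exact Or.inl h
              · right; omega
              · right; omega
        · have hbeq : (b == x) = false := by simpa using hbx
          simp only [hbeq, Bool.false_eq_true, if_false]
          have hble : b ≤ x := hfront _ hlmem x (by simp)
          have hall : ∀ r ∈ R, r.2.2 < x := by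
            intro r hr
            rw [← hdecomp] at hr
            rcases List.mem_append.1 hr with hr | hr
            · have := hcross r hr (s, a, b) (by simp)
              simp only at this
              omega
            · simp at hr
              subst hr
              exact (by omega : b < x)
          refine ⟨⟨?_, ?_⟩, ?_, ?_⟩
          · intro r hr
            rcases List.mem_append.1 hr with hr | hr
            · exact hacc.1 r hr
            · simp at hr
              subst hr
              exact ⟨rfl, by exact (by omega : x < x + 1)⟩
          · rw [List.pairwise_append]
            refine ⟨hacc.2, by simp, ?_⟩
            intro r hr r' hr'
            simp at hr'
            subst hr'
            simpa using hall r hr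
          · intro r hr x' hx'
            rcases List.mem_append.1 hr with hr | hr
            · exact hfront r hr x' (List.mem_cons_of_mem _ hx')
            · simp at hr
              subst hr
              have := hxlt x' hx'
              exact (by omega : x + 1 ≤ x')
          · intro t
            rw [pv_cov_append]
            simp only [Bool.or_eq_true]
            have h1 : pvCov [(sig, x, x + 1)] sig t = true ↔ t = x := by
              simp [pvCov, pvPredAt]
              omega
            rw [h1]
    obtain ⟨R', hR', hacc', hfront', hcov'⟩ := hstep
    rw [← hR']
    obtain ⟨hacc'', hcov''⟩ := ih R' sig hpw' hacc' hfront'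
    refine ⟨hacc'', ?_⟩
    intro t
    rw [hcov'' t, hcov' t]
    simp only [List.mem_cons]
    tauto
lemma pv_us_mem (lst : List PvBox) (sig : PvSig) (t : Int) :
    (sig, t) ∈ pvUnitSigs lst ↔ pvMk sig t ∈ lst := by
  simp only [pvUnitSigs, List.mem_map, List.mem_filter]
  constructor
  · rintro ⟨b, ⟨hb, hu⟩, he⟩
    obtain ⟨b1, b2, b3, b4, b5, b6⟩ := b
    simp only [pvSigOf, Prod.mk.injEq] at he hu
    simp only [beq_iff_eq] at hu
    obtain ⟨hsig, ht⟩ := he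
    have : pvMk sig t = (b1, b2, b3, b4, b5, b6) := by
      simp [pvMk, ← hsig, ← ht, hu]
    rwa [this]
  · intro hmem
    refine ⟨pvMk sig t, ⟨hmem, by simp [pvMk]⟩, by simp [pvMk, pvSigOf]⟩

lemma pv_us_nodup {lst : List PvBox} (hnd : lst.Nodup) : (pvUnitSigs lst).Nodup := by
  refine (hnd.filter _).map_on ?_
  rintro ⟨a1, a2, a3, a4, a5, a6⟩ ha ⟨b1, b2, b3, b4, b5, b6⟩ hb he
  simp only [List.mem_filter, beq_iff_eq] at ha hb
  simp only [pvSigOf, Prod.mk.injEq] at he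
  obtain ⟨⟨e3, e4, e5, e6⟩, e1⟩ := he
  have h2 : a2 = b2 := by omega
  simp [e1, e3, e4, e5, e6, h2]

lemma pv_xs_mem (us : List (PvSig × Int)) (sig : PvSig) (t : Int) :
    t ∈ PySem.List.sorted ((us.filter (fun p => p.1 == sig)).map Prod.snd) (fun x => x) false
      ↔ (sig, t) ∈ us := by
  rw [PySem.List.mem_sorted]
  simp only [List.mem_map, List.mem_filter, beq_iff_eq]
  constructor
  · rintro ⟨p, ⟨hp, hp1⟩, hp2⟩
    obtain ⟨p1, p2⟩ := p
    simp only at hp1 hp2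
    rwa [hp1, hp2] at hp
  · intro h
    exact ⟨(sig, t), ⟨h, rfl⟩, rfl⟩

lemma pv_xs_pairwise {us : List (PvSig × Int)} (hus : us.Nodup) (sig : PvSig) :
    (PySem.List.sorted ((us.filter (fun p => p.1 == sig)).map Prod.snd) (fun x => x) false).Pairwise
      (fun a b => a < b) := by
  have hnd : ((us.filter (fun p => p.1 == sig)).map Prod.snd).Nodup := by
    refine (hus.filter _).map_on ?_
    rintro ⟨p1, p2⟩ hp ⟨q1, q2⟩ hq he
    simp only [List.mem_filter, beq_iff_eq] at hp hq
    simp only at he hp hq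
    simp [he, hp.2, hq.2]
  have hnd' : (PySem.List.sorted ((us.filter (fun p => p.1 == sig)).map Prod.snd) (fun x => x) false).Nodup :=
    (PySem.List.sorted_perm _ _ _).nodup_iff.2 hnd
  have hle := PySem.List.sorted_pairwise ((us.filter (fun p => p.1 == sig)).map Prod.snd) (fun x => x)
  refine (hnd'.and hle).imp ?_
  rintro a b ⟨hne, hle'⟩
  exact lt_of_le_of_ne hle' hne

lemma pv_block_sig {sig : PvSig} {R : List PvIv} (hacc : pvChainAcc sig R)
    {sig' : PvSig} {t : Int} (h : pvCov R sig' t = true) : sig' = sig := by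
  obtain ⟨r, hr, h1, -, -⟩ := (pv_cov_iff _ _ _).1 h
  rw [← h1]
  exact (hacc.1 r hr).1

lemma pv_build_fold (us : List (PvSig × Int)) (hus : us.Nodup) :
    ∀ (sigs : List PvSig) (acc : List PvIv),
    sigs.Nodup → pvWF acc → (∀ r ∈ acc, r.1 ∉ sigs) →
    pvWF (sigs.foldl (fun acc sig =>
        acc ++ pvRunsOf sig (PySem.List.sorted ((us.filter (fun p => p.1 == sig)).map Prod.snd) (fun x => x) false)) acc)
    ∧ (∀ sig t, pvCov (sigs.foldl (fun acc sig =>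
        acc ++ pvRunsOf sig (PySem.List.sorted ((us.filter (fun p => p.1 == sig)).map Prod.snd) (fun x => x) false)) acc) sig t = true
      ↔ (pvCov acc sig t = true ∨ (sig ∈ sigs ∧ (sig, t) ∈ us))) := by
  intro sigs
  induction sigs with
  | nil =>
    intro acc _ hWF _
    refine ⟨hWF, ?_⟩
    intro sig t
    simp
  | cons sg sigs' ih =>
    intro acc hsnd hWF hnotin
    obtain ⟨hsg, hsnd'⟩ := List.nodup_cons.1 hsnd
    rw [List.foldl_cons]
    set xs := PySem.List.sorted ((us.filter (fun p => p.1 == sg)).map Prod.snd) (fun x => x) false with hxs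
    obtain ⟨hchain, hcov⟩ := pv_runs_fold xs [] sg (pv_xs_pairwise hus sg)
      (show pvChainAcc sg [] from ⟨by simp, by simp⟩) (by simp)
    have hblock : pvChainAcc sg (pvRunsOf sg xs) := hchain
    have hcovb : ∀ t, pvCov (pvRunsOf sg xs) sg t = true ↔ t ∈ xs := by
      intro t
      rw [pvRunsOf]
      rw [hcov t]
      simp [pvCov]
    have hWF' : pvWF (acc ++ pvRunsOf sg xs) := by
      constructor
      · intro r hr
        rcases List.mem_append.1 hr with hr | hr
        · exact hWF.1 r hr
        · exact (hblock.1 r hr).2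
      · rw [List.pairwise_append]
        refine ⟨hWF.2, (pv_chain_WF hblock).2, ?_⟩
        intro r hr r' hr' hsig
        exfalso
        refine hnotin r hr ?_
        rw [hsig, (hblock.1 r' hr').1]
        simp
    have hnotin' : ∀ r ∈ acc ++ pvRunsOf sg xs, r.1 ∉ sigs' := by
      intro r hr
      rcases List.mem_append.1 hr with hr | hr
      · exact fun hc => hnotin r hr (List.mem_cons_of_mem _ hc)
      · rw [(hblock.1 r hr).1]
        exact hsg
    obtain ⟨hWF'', hcov''⟩ := ih (acc ++ pvRunsOf sg xs) hsnd' hWF' hnotin'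
    refine ⟨hWF'', ?_⟩
    intro sig t
    rw [hcov'' sig t, pv_cov_append]
    simp only [Bool.or_eq_true, List.mem_cons]
    constructor
    · rintro ((h | h) | h)
      · exact Or.inl h
      · have hse : sig = sg := pv_block_sig hblock h
        subst hse
        exact Or.inr ⟨Or.inl rfl, (pv_xs_mem us sig t).1 ((hcovb t).1 h)⟩
      · exact Or.inr ⟨Or.inr h.1, h.2⟩
    · rintro (h | ⟨hs | hs, hmem⟩)
      · exact Or.inl (Or.inl h)
      · subst hs
        exact Or.inl (Or.inr ((hcovb t).2 ((pv_xs_mem us sig t).2 hmem)))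
      · exact Or.inr ⟨hs, hmem⟩

lemma pv_build_spec (lst : List PvBox) (hnd : lst.Nodup) :
    pvWF (pvBuildIvals (pvUnitSigs lst) (PySem.List.dedup ((pvUnitSigs lst).map Prod.fst)))
  ∧ ∀ sig t, pvCov (pvBuildIvals (pvUnitSigs lst) (PySem.List.dedup ((pvUnitSigs lst).map Prod.fst))) sig t = true
      ↔ pvMk sig t ∈ lst := by
  obtain ⟨hWF, hcov⟩ := pv_build_fold (pvUnitSigs lst) (pv_us_nodup hnd)
    (PySem.List.dedup ((pvUnitSigs lst).map Prod.fst)) [] (PySem.List.nodup_dedup _)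
    ⟨by simp, by simp⟩ (by simp)
  refine ⟨hWF, ?_⟩
  intro sig t
  rw [pvBuildIvals, hcov sig t]
  simp only [pvCov, List.any_nil, Bool.false_eq_true, false_or]
  rw [← pv_us_mem lst sig t]
  constructor
  · rintro ⟨-, h⟩
    exact h
  · intro h
    refine ⟨?_, h⟩
    rw [PySem.List.mem_dedup]
    exact List.mem_map.2 ⟨(sig, t), h, rfl⟩
-- ---- the main simulation: A's destructive loop against B's interval pass ----

lemma pv_avail_mk (ivals : List PvIv) (sig : PvSig) (t : Int) :
    pvAvail ivals (pvMk sig t) = pvCov ivals sig t := by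
  simp [pvAvail, pvMk, pvSigOf]

lemma pv_avail_sub {ivals ivals' : List PvIv} {sig : PvSig} {lo hi : Int}
    (hcov : ∀ sig' t, pvCov ivals' sig' t
      = (pvCov ivals sig' t && !((sig' == sig) && decide (lo ≤ t) && decide (t < hi))))
    (u : PvBox) :
    pvAvail ivals' u = (pvAvail ivals u && !pvSeg sig lo hi u) := by
  obtain ⟨u1, u2, u3, u4, u5, u6⟩ := u
  by_cases hu : u2 = u1 + 1
  · have hb : (u2 == u1 + 1) = true := by simpa using hu
    simp only [pvAvail, pvSeg, pvSigOf, hb, if_true, Bool.true_and]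
    rw [hcov]
  · have hb : (u2 == u1 + 1) = false := by simpa using hu
    simp [pvAvail, pvSeg, pvSigOf, hb]

lemma pv_avail_erase_unit {ivals : List PvIv} (hWF : pvWF ivals) {iv : PvIv} (hmem : iv ∈ ivals)
    {sig : PvSig} {x0 : Int} (hsig : iv.1 = sig) (ha : iv.2.1 ≤ x0) (hb : x0 < iv.2.2)
    (u : PvBox) (hne : u ≠ pvMk sig x0) :
    pvAvail (ivals.erase iv) u
      = (pvAvail ivals u && !pvSeg sig (x0 + 1) iv.2.2 u && !pvSeg sig iv.2.1 x0 u) := by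
  obtain ⟨u1, u2, u3, u4, u5, u6⟩ := u
  by_cases hu : u2 = u1 + 1
  · have hbq : (u2 == u1 + 1) = true := by simpa using hu
    simp only [pvAvail, pvSeg, pvSigOf, hbq, if_true, Bool.true_and]
    rw [pv_cov_erase hWF hmem]
    by_cases hs : ((u3, u4, u5, u6) : PvSig) = sig
    · have hs' : (((u3, u4, u5, u6) : PvSig) == sig) = true := by simpa using hs
      have hiv : pvPredAt (u3, u4, u5, u6) u1 iv
          = (decide (iv.2.1 ≤ u1) && decide (u1 < iv.2.2)) := by
        simp [pvPredAt, hsig, hs]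
      rw [hiv, hs']
      have hu1 : u1 ≠ x0 := by
        intro he
        refine hne ?_
        simp [pvMk, he, hu, ← hs]
      cases h1 : decide (iv.2.1 ≤ u1) <;> cases h2 : decide (u1 < iv.2.2) <;>
        cases h3 : decide (x0 + 1 ≤ u1) <;> cases h4 : decide (u1 < x0) <;>
          simp at h1 h2 h3 h4 <;> simp <;> omega
    · have hs' : (((u3, u4, u5, u6) : PvSig) == sig) = false := by simpa using hs
      have hiv : pvPredAt (u3, u4, u5, u6) u1 iv = false := by
        have : (iv.1 == ((u3, u4, u5, u6) : PvSig)) = false := by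
          rw [hsig]
          simpa using fun he => hs he.symm
        simp [pvPredAt, this]
      rw [hiv, hs']
      simp
  · have hbq : (u2 == u1 + 1) = false := by simpa using hu
    simp [pvAvail, pvSeg, pvSigOf, hbq]

lemma pv_main : ∀ (q : List PvBox) (ivals : List PvIv) (grown : PySem.Set PvBox) (fuel : Nat),
    q.Nodup → pvWF ivals →
    (∀ sig t, pvCov ivals sig t = true → pvMk sig t ∈ q) →
    q.length ≤ fuel →
    pvALoop fuel (q.filter (pvAvail ivals)) grown = (q.foldl pvBStep (ivals, grown)).2 := by
  intro q
  induction q with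
  | nil =>
    intro ivals grown fuel _ _ _ _
    simp [pv_aLoop_nil]
  | cons x q' ih =>
    intro ivals grown fuel hq hWF hqcov hfuel
    obtain ⟨hxq', hq'⟩ := List.nodup_cons.1 hq
    obtain ⟨x0, x1, y0, y1, z0, z1⟩ := x
    cases fuel with
    | zero => simp at hfuel
    | succ f =>
      have hAq : ((x0, x1, y0, y1, z0, z1) :: q').filter (pvAvail ivals)
          = (if pvAvail ivals (x0, x1, y0, y1, z0, z1) then [(x0, x1, y0, y1, z0, z1)] else [])
            ++ q'.filter (pvAvail ivals) := by
        rw [List.filter_cons]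
        by_cases hav : pvAvail ivals (x0, x1, y0, y1, z0, z1) = true
        · simp [hav]
        · simp [Bool.eq_false_iff.2 hav]
      have hndAq : (q'.filter (pvAvail ivals)).Nodup := hq'.filter _
      by_cases hunit : x1 = x0 + 1
      · -- unit box
        have hbu : (x1 == x0 + 1) = true := by simpa using hunit
        cases hfind : ivals.find? (pvPredAt ((y0, y1, z0, z1) : PvSig) x0) with
        | none =>
          have hcov0 : pvCov ivals (y0, y1, z0, z1) x0 = false := (pv_find?_none_iff _ _ _).1 hfind
          have hav : pvAvail ivals (x0, x1, y0, y1, z0, z1) = false := by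
            simp only [pvAvail, pvSigOf, hbu, if_true]
            exact hcov0
          rw [hAq, hav]
          simp only [Bool.false_eq_true, if_false, List.nil_append]
          rw [List.foldl_cons]
          have hstep : pvBStep (ivals, grown) (x0, x1, y0, y1, z0, z1) = (ivals, grown) := by
            simp only [pvBStep, hbu, if_true]
            rw [show (fun r : PvIv => r.1 == ((y0, y1, z0, z1) : PvSig) && decide (r.2.1 ≤ x0) && decide (x0 < r.2.2))
                = pvPredAt (y0, y1, z0, z1) x0 from rfl, hfind]
          rw [hstep]
          refine ih ivals grown (f + 1) hq' hWF ?_ (by simp at hfuel; omega)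
          intro sig t hc
          have := hqcov sig t hc
          rcases List.mem_cons.1 this with he | he
          · exfalso
            have ht : t = x0 ∧ sig = (y0, y1, z0, z1) := by
              obtain ⟨s1, s2, s3, s4⟩ := sig
              simp [pvMk, Prod.ext_iff] at he
              exact ⟨he.1, by simp [he.2.2]⟩
            rw [ht.1, ht.2] at hc
            rw [hc] at hcov0
            exact absurd hcov0 (by simp)
          · exact he
        | some iv =>
          have hmem : iv ∈ ivals := List.mem_of_find?_eq_some hfind
          obtain ⟨hsig, hivl, hivr⟩ := (pv_predAt_iff _ _ _).1 (List.find?_some hfind)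
          have hcov0 : pvCov ivals (y0, y1, z0, z1) x0 = true :=
            pv_cov_of_mem hmem hsig hivl hivr
          have hav : pvAvail ivals (x0, x1, y0, y1, z0, z1) = true := by
            simp only [pvAvail, pvSigOf, hbu, if_true]
            exact hcov0
          rw [hAq, hav]
          simp only [if_true, List.singleton_append]
          rw [pvALoop, PySem.List.pop?_zero_cons]
          simp only
          -- right growth absorbs [x1, iv.2.2)
          have hk1 : ((iv.2.2 - x1).toNat : Int) = iv.2.2 - x1 := Int.toNat_of_nonneg (by omega)
          have hgrowR := pv_growR_chunk (iv.2.2 - x1).toNat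
            (q'.filter (pvAvail ivals)) x1
            (q'.filter (pvAvail ivals)).length y0 y1 z0 z1 hndAq (le_refl _)
            (by
              intro t ht1 ht2
              rw [hk1] at ht2
              have hct : pvCov ivals (y0, y1, z0, z1) t = true :=
                pv_cov_of_mem hmem hsig (by omega) (by omega)
              have hmm := hqcov _ _ hct
              have hne : pvMk (y0, y1, z0, z1) t ≠ (x0, x1, y0, y1, z0, z1) := by
                intro he
                have : t = x0 := congrArg (·.1) he
                omega
              rcases List.mem_cons.1 hmm with he | he
              · exact absurd he hne
              · refine List.mem_filter.2 ⟨he, ?_⟩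
                rw [show ((t, t + 1, y0, y1, z0, z1) : PvBox) = pvMk (y0, y1, z0, z1) t from rfl,
                  pv_avail_mk]
                exact hct)
            (by
              rw [hk1, show x1 + (iv.2.2 - x1) = iv.2.2 by ring]
              intro hin
              have := (List.mem_filter.1 hin).2
              rw [show ((iv.2.2, iv.2.2 + 1, y0, y1, z0, z1) : PvBox) = pvMk (y0, y1, z0, z1) iv.2.2 from rfl,
                pv_avail_mk] at this
              rw [pv_cov_end hWF hmem hsig] at this
              exact absurd this (by simp))
          rw [hk1, show x1 + (iv.2.2 - x1) = iv.2.2 by ring] at hgrowR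
          rw [hgrowR]
          simp only
          -- left growth absorbs [iv.2.1, x0)
          have hk2 : ((x0 - iv.2.1).toNat : Int) = x0 - iv.2.1 := Int.toNat_of_nonneg (by omega)
          have hgrowL := pv_growL_chunk (x0 - iv.2.1).toNat
            ((q'.filter (pvAvail ivals)).filter
              (fun u => !pvSeg (y0, y1, z0, z1) x1 iv.2.2 u)) x0
            ((q'.filter (pvAvail ivals)).filter
              (fun u => !pvSeg (y0, y1, z0, z1) x1 iv.2.2 u)).length y0 y1 z0 z1
            (hndAq.filter _) (le_refl _)
            (by
              intro t ht1 ht2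
              rw [hk2] at ht1
              have hct : pvCov ivals (y0, y1, z0, z1) t = true :=
                pv_cov_of_mem hmem hsig (by omega) (by omega)
              have hmm := hqcov _ _ hct
              have hne : pvMk (y0, y1, z0, z1) t ≠ (x0, x1, y0, y1, z0, z1) := by
                intro he
                have : t = x0 := congrArg (·.1) he
                omega
              rcases List.mem_cons.1 hmm with he | he
              · exact absurd he hne
              · refine List.mem_filter.2 ⟨List.mem_filter.2 ⟨he, ?_⟩, ?_⟩
                · rw [show ((t, t + 1, y0, y1, z0, z1) : PvBox) = pvMk (y0, y1, z0, z1) t from rfl,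
                    pv_avail_mk]
                  exact hct
                · simp only [pvSeg, pvSigOf]
                  have : decide (x1 ≤ t) = false := by simpa using by omega
                  simp [this])
            (by
              rw [hk2, show x0 - (x0 - iv.2.1) = iv.2.1 by ring]
              intro hin
              have := (List.mem_filter.1 (List.mem_filter.1 hin).1).2
              rw [show ((iv.2.1 - 1, iv.2.1, y0, y1, z0, z1) : PvBox)
                  = pvMk (y0, y1, z0, z1) (iv.2.1 - 1) from by simp [pvMk], pv_avail_mk] at this
              rw [pv_cov_start hWF hmem hsig] at this
              exact absurd this (by simp))
          rw [hk2, show x0 - (x0 - iv.2.1) = iv.2.1 by ring] at hgrowL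
          rw [hgrowL]
          simp only
          -- the two filters equal the availability filter for the erased interval list
          have hlist : ((q'.filter (pvAvail ivals)).filter
                (fun u => !pvSeg (y0, y1, z0, z1) x1 iv.2.2 u)).filter
                (fun u => !pvSeg (y0, y1, z0, z1) iv.2.1 x0 u)
              = q'.filter (pvAvail (ivals.erase iv)) := by
            rw [List.filter_filter, List.filter_filter]
            apply List.filter_congr
            intro u hu
            have hne : u ≠ pvMk (y0, y1, z0, z1) x0 := by
              intro he
              have hx : pvMk ((y0, y1, z0, z1) : PvSig) x0 = (x0, x1, y0, y1, z0, z1) := by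
                simp [pvMk, hunit]
              rw [he, hx] at hu
              exact hxq' hu
            rw [pv_avail_erase_unit hWF hmem hsig hivl hivr u hne]
            rw [hunit]
            cases h1 : pvAvail ivals u <;>
              cases h2 : pvSeg (y0, y1, z0, z1) (x0 + 1) iv.2.2 u <;>
                cases h3 : pvSeg (y0, y1, z0, z1) iv.2.1 x0 u <;> simp [h1, h2, h3]
          rw [hlist]
          -- B's step
          rw [List.foldl_cons]
          have hstep : pvBStep (ivals, grown) (x0, x1, y0, y1, z0, z1)
              = (ivals.erase iv, PySem.Set.add grown (iv.2.1, iv.2.2, y0, y1, z0, z1)) := by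
            simp only [pvBStep, hbu, if_true]
            rw [show (fun r : PvIv => r.1 == ((y0, y1, z0, z1) : PvSig) && decide (r.2.1 ≤ x0) && decide (x0 < r.2.2))
                = pvPredAt (y0, y1, z0, z1) x0 from rfl, hfind]
          rw [hstep]
          refine ih (ivals.erase iv) _ f hq' (pv_WF_erase hWF iv) ?_ (by simp at hfuel; omega)
          intro sig t hc
          rw [pv_cov_erase hWF hmem] at hc
          simp only [Bool.and_eq_true, Bool.not_eq_true'] at hc
          obtain ⟨hc', hiv⟩ := hc
          rcases List.mem_cons.1 (hqcov sig t hc') with he | he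
          · exfalso
            have ht : t = x0 ∧ sig = (y0, y1, z0, z1) := by
              obtain ⟨s1, s2, s3, s4⟩ := sig
              simp [pvMk, Prod.ext_iff] at he
              exact ⟨he.1, by simp [he.2.2]⟩
            rw [ht.1, ht.2] at hiv
            rw [(pv_predAt_iff _ _ _).2 ⟨hsig, hivl, hivr⟩] at hiv
            exact absurd hiv (by simp)
          · exact he
      · -- non-unit box: it always seeds
        have hbu : (x1 == x0 + 1) = false := by simpa using hunit
        have hav : pvAvail ivals (x0, x1, y0, y1, z0, z1) = true := by
          simp [pvAvail, hbu]
        rw [hAq, hav]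
        simp only [if_true, List.singleton_append]
        rw [pvALoop, PySem.List.pop?_zero_cons]
        simp only
        obtain ⟨hWF1, hle1, hcseg1, hstop1, hform1⟩ :=
          pv_consumeR_spec ivals (y0, y1, z0, z1) x1 hWF
        obtain ⟨hWF2, hle2, hcseg2, hstop2, hform2⟩ :=
          pv_consumeL_spec (pvConsumeR ivals (y0, y1, z0, z1) x1).1 (y0, y1, z0, z1) x0 hWF1
        set hi := (pvConsumeR ivals (y0, y1, z0, z1) x1).2 with hhi
        set lo := (pvConsumeL (pvConsumeR ivals (y0, y1, z0, z1) x1).1 (y0, y1, z0, z1) x0).2 with hlo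
        have hmkne : ∀ t : Int, pvMk ((y0, y1, z0, z1) : PvSig) t ≠ (x0, x1, y0, y1, z0, z1) := by
          intro t he
          have h1 : t = x0 := congrArg (·.1) he
          have h2 : t + 1 = x1 := congrArg (·.2.1) he
          omega
        have hk1 : ((hi - x1).toNat : Int) = hi - x1 := Int.toNat_of_nonneg (by omega)
        have hgrowR := pv_growR_chunk (hi - x1).toNat
          (q'.filter (pvAvail ivals)) x1
          (q'.filter (pvAvail ivals)).length y0 y1 z0 z1 hndAq (le_refl _)
          (by
            intro t ht1 ht2
            rw [hk1] at ht2
            have hct : pvCov ivals (y0, y1, z0, z1) t = true := hcseg1 t ht1 (by omega)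
            rcases List.mem_cons.1 (hqcov _ _ hct) with he | he
            · exact absurd he (hmkne t)
            · refine List.mem_filter.2 ⟨he, ?_⟩
              rw [show ((t, t + 1, y0, y1, z0, z1) : PvBox) = pvMk (y0, y1, z0, z1) t from rfl,
                pv_avail_mk]
              exact hct)
          (by
            rw [hk1, show x1 + (hi - x1) = hi by ring]
            intro hin
            have := (List.mem_filter.1 hin).2
            rw [show ((hi, hi + 1, y0, y1, z0, z1) : PvBox) = pvMk (y0, y1, z0, z1) hi from rfl,
              pv_avail_mk] at this
            rw [hstop1] at this
            exact absurd this (by simp))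
        rw [hk1, show x1 + (hi - x1) = hi by ring] at hgrowR
        rw [hgrowR]
        simp only
        have hlist1 : (q'.filter (pvAvail ivals)).filter
              (fun u => !pvSeg (y0, y1, z0, z1) x1 hi u)
            = q'.filter (pvAvail (pvConsumeR ivals (y0, y1, z0, z1) x1).1) := by
          rw [List.filter_filter]
          apply List.filter_congr
          intro u hu
          rw [pv_avail_sub hform1 u]
          exact Bool.and_comm _ _
        rw [hlist1]
        have hndM : (q'.filter (pvAvail (pvConsumeR ivals (y0, y1, z0, z1) x1).1)).Nodup :=
          hq'.filter _
        have hk2 : ((x0 - lo).toNat : Int) = x0 - lo := Int.toNat_of_nonneg (by omega)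
        have hcovR_of : ∀ sig t, pvCov (pvConsumeR ivals (y0, y1, z0, z1) x1).1 sig t = true →
            pvCov ivals sig t = true := by
          intro sig t h
          rw [hform1 sig t] at h
          simp only [Bool.and_eq_true] at h
          exact h.1
        have hgrowL := pv_growL_chunk (x0 - lo).toNat
          (q'.filter (pvAvail (pvConsumeR ivals (y0, y1, z0, z1) x1).1)) x0
          (q'.filter (pvAvail (pvConsumeR ivals (y0, y1, z0, z1) x1).1)).length y0 y1 z0 z1
          hndM (le_refl _)
          (by
            intro t ht1 ht2
            rw [hk2] at ht1
            have hct : pvCov (pvConsumeR ivals (y0, y1, z0, z1) x1).1 (y0, y1, z0, z1) t = true :=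
              hcseg2 t (by omega) ht2
            rcases List.mem_cons.1 (hqcov _ _ (hcovR_of _ _ hct)) with he | he
            · exact absurd he (hmkne t)
            · refine List.mem_filter.2 ⟨he, ?_⟩
              rw [show ((t, t + 1, y0, y1, z0, z1) : PvBox) = pvMk (y0, y1, z0, z1) t from rfl,
                pv_avail_mk]
              exact hct)
          (by
            rw [hk2, show x0 - (x0 - lo) = lo by ring]
            intro hin
            have := (List.mem_filter.1 hin).2
            rw [show ((lo - 1, lo, y0, y1, z0, z1) : PvBox)
                = pvMk (y0, y1, z0, z1) (lo - 1) from by simp [pvMk], pv_avail_mk] at this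
            rw [hstop2] at this
            exact absurd this (by simp))
        rw [hk2, show x0 - (x0 - lo) = lo by ring] at hgrowL
        rw [hgrowL]
        simp only
        have hlist2 : (q'.filter (pvAvail (pvConsumeR ivals (y0, y1, z0, z1) x1).1)).filter
              (fun u => !pvSeg (y0, y1, z0, z1) lo x0 u)
            = q'.filter
                (pvAvail (pvConsumeL (pvConsumeR ivals (y0, y1, z0, z1) x1).1 (y0, y1, z0, z1) x0).1) := by
          rw [List.filter_filter]
          apply List.filter_congr
          intro u hu
          rw [pv_avail_sub hform2 u]
          exact Bool.and_comm _ _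
        rw [hlist2]
        rw [List.foldl_cons]
        have hstep : pvBStep (ivals, grown) (x0, x1, y0, y1, z0, z1)
            = ((pvConsumeL (pvConsumeR ivals (y0, y1, z0, z1) x1).1 (y0, y1, z0, z1) x0).1,
               PySem.Set.add grown (lo, hi, y0, y1, z0, z1)) := by
          simp only [pvBStep, hbu, Bool.false_eq_true, if_false]
          rfl
        rw [hstep]
        refine ih _ _ f hq' hWF2 ?_ (by simp at hfuel; omega)
        intro sig t hc
        have hc1 : pvCov (pvConsumeR ivals (y0, y1, z0, z1) x1).1 sig t = true := by
          rw [hform2 sig t] at hc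
          simp only [Bool.and_eq_true] at hc
          exact hc.1
        rcases List.mem_cons.1 (hqcov sig t (hcovR_of _ _ hc1)) with he | he
        · exfalso
          have h1 : t = x0 := congrArg (·.1) he
          have h2 : t + 1 = x1 := congrArg (·.2.1) he
          omega
        · exact he
-- ===== VERDICT (by name: the statement is the Claim_ definition above) =====
theorem grow_boxes_along_x_py_spec : Claim_equal_grow_boxes_along_x_py := by
  intro boxes _ hpre
  unfold Spec_grow_boxes_along_x_py grow_boxes_along_x_py grow_boxes_along_x_py_alt
  obtain ⟨hWF, hcov⟩ := pv_build_spec boxes hpre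
  have hqcov : ∀ sig t,
      pvCov (pvBuildIvals (pvUnitSigs boxes) (PySem.List.dedup ((pvUnitSigs boxes).map Prod.fst))) sig t = true →
      pvMk sig t ∈ boxes := by
    intro sig t h
    exact (hcov sig t).1 h
  have hmain := pv_main boxes
    (pvBuildIvals (pvUnitSigs boxes) (PySem.List.dedup ((pvUnitSigs boxes).map Prod.fst)))
    PySem.Set.empty boxes.length hpre hWF hqcov (by simp)
  have hfe : boxes.filter
      (pvAvail (pvBuildIvals (pvUnitSigs boxes) (PySem.List.dedup ((pvUnitSigs boxes).map Prod.fst))))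
      = boxes := by
    apply List.filter_eq_self.2
    intro u hu
    obtain ⟨u1, u2, u3, u4, u5, u6⟩ := u
    by_cases hub : u2 = u1 + 1
    · have hmk : pvMk ((u3, u4, u5, u6) : PvSig) u1 = (u1, u2, u3, u4, u5, u6) := by
        simp [pvMk, hub]
    
      have hc : pvCov (pvBuildIvals (pvUnitSigs boxes) (PySem.List.dedup ((pvUnitSigs boxes).map Prod.fst)))
          (u3, u4, u5, u6) u1 = true := (hcov _ _).2 (by rw [hmk]; exact hu)
      have hb2 : (u2 == u1 + 1) = true := by simpa using hub
      simp only [pvAvail, hb2, if_true, pvSigOf]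
      exact hc
    · have : (u2 == u1 + 1) = false := by simpa using hub
      simp [pvAvail, this]
  rw [hfe] at hmain
  exact hmain
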